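-- pv_equiv track=rewrite | github.com/khaledelhady44/Code-forces | doNotBeDistracted.py | sus
-- ===== SOURCE A (Python) =====
-- def sus(n, tasks):
--     letters = []
--     prev_letter = ""
--     for letter in tasks:
--         if letter != prev_letter:
--             if letter in letters:
--                 return "NO"
--             else:
--                 letters.append(letter)
--         prev_letter = letter
--     return "YES"
-- ===== SOURCE B (Python) =====
-- def sus(n, tasks):
--     # A letter is "resumed" iff it heads more than one maximal run. Count runs
--     # arithmetically (1 + number of adjacent unequal pairs) and compare with the
--     # number of distinct letters: they are equal exactly when no letter resumes.
--     if not tasks: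
--         return "YES"
--     runs = 1 + sum(a != b for a, b in zip(tasks, tasks[1:]))
--     return "YES" if len(set(tasks)) == runs else "NO"
-- ===== Notes on version B (the rewrite author's own statement) =====
-- stated objective: alternative
-- what changed: Replaces A's streaming seen-list with early return by a purely arithmetic test: count the runs as 1 + number of adjacent unequal pairs, count the distinct letters with a set, and answer YES iff the two counts are equal (each letter then heads exactly one run).
import Mathlib
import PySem

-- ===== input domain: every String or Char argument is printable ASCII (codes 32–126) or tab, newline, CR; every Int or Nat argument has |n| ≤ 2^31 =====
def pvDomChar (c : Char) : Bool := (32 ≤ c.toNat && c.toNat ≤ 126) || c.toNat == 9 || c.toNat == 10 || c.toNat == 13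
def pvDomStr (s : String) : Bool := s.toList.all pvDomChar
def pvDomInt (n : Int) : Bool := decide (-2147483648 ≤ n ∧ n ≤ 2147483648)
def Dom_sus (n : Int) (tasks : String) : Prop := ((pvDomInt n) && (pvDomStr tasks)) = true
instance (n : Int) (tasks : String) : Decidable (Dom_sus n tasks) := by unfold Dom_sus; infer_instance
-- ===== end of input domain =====

-- B replaces A's streaming seen-list loop by an arithmetic test (runs count vs distinct-letter count); objective: alternative.

-- ===== PORT A =====
-- prev_letter : Python starts with "" (never equal to a 1-char string), then holds the last letter;
-- modelled exactly as Option Char with none for "".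
def susLoop (letters : List Char) (prev : Option Char) : List Char → String
  | [] => "YES"
  | c :: rest =>
    if some c ≠ prev then
      if c ∈ letters then "NO"
      else susLoop (letters ++ [c]) (some c) rest
    else susLoop letters prev rest

def sus (_n : Int) (tasks : String) : String :=
  susLoop [] none tasks.toList

-- ===== PORT B =====
-- Source B: empty guard; runs = 1 + sum(a != b for a, b in zip(tasks, tasks[1:])); compare with len(set(tasks)).
def sus_alt (_n : Int) (tasks : String) : String :=
  let l := tasks.toList
  if l = [] then "YES"
  else
    let runs : Nat := 1 + (l.zip l.tail).countP (fun ab => decide (ab.1 ≠ ab.2))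
    if (PySem.Set.ofList l).length = runs then "YES" else "NO"

-- ===== PRECONDITION & SPEC =====
def Spec_sus (n : Int) (tasks : String) (out : String) : Prop := out = sus_alt n tasks
instance (n : Int) (tasks : String) (out : String) : Decidable (Spec_sus n tasks out) := by unfold Spec_sus; infer_instance

-- ===== CLAIM (what is proved, stated in full; the proofs are below) =====
def Claim_equal_sus : Prop := ∀ (n : Int) (tasks : String), Dom_sus n tasks → Spec_sus n tasks (sus n tasks)

-- ===== LEMMAS AND PROOFS =====

-- the run keys of l, given the previous letter (none = start): reference compression
def ckeys (prev : Option Char) : List Char → List Char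
  | [] => []
  | c :: rest => if some c = prev then ckeys prev rest else c :: ckeys (some c) rest

-- A's loop answers YES exactly when the accumulated letters plus the remaining run keys are duplicate-free
lemma susLoop_eq (l : List Char) (letters : List Char) (prev : Option Char)
    (h : letters.Nodup) :
    susLoop letters prev l = if (letters ++ ckeys prev l).Nodup then "YES" else "NO" := by
  induction l generalizing letters prev with
  | nil => simp [susLoop, ckeys, h]
  | cons c rest ih =>
    by_cases hp : some c = prev
    · simp [susLoop, ckeys, hp, ih letters prev h]
    · by_cases hm : c ∈ letters
      · have : ¬ (letters ++ ckeys prev (c :: rest)).Nodup := by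
          simp only [ckeys, if_neg hp]
          intro hnd
          rcases List.nodup_append.mp hnd with ⟨_, _, hdisj⟩
          exact hdisj c hm c (List.mem_cons_self) rfl
        simp [susLoop, hp, hm, this]
      · have hnd : (letters ++ [c]).Nodup := by
          rw [List.nodup_append]
          exact ⟨h, List.nodup_singleton c, fun a ha b hb => by
            simp only [List.mem_singleton] at hb
            exact hb ▸ fun he => hm (he ▸ ha)⟩
        simp only [susLoop, if_pos hp, if_neg hm]
        rw [ih _ _ hnd, List.append_assoc, List.singleton_append]
        simp only [ckeys, if_neg hp]

-- a run-key list has the same members as its source (for keys not matching the pending previous letter)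
lemma mem_ckeys (c : Char) (l : List Char) :
    ∀ prev : Option Char, some c ≠ prev → (c ∈ ckeys prev l ↔ c ∈ l) := by
  induction l with
  | nil => intro prev _; simp [ckeys]
  | cons d t ih =>
    intro prev hprev
    by_cases hd : some d = prev
    · have hcd : c ≠ d := fun he => hprev (he ▸ hd)
      simp [ckeys, hd, hcd, ih prev hprev]
    · by_cases hcd : c = d
      · subst hcd; simp [ckeys, hd]
      · simp [ckeys, hd, hcd, ih (some d) (by simpa using hcd)]

-- the number of run keys equals 1 + the number of adjacent unequal pairs (shifted-zip form)
lemma ckeys_length (l : List Char) :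
    ∀ p : Char, (ckeys (some p) l).length
      = ((p :: l).zip l).countP (fun ab => decide (ab.1 ≠ ab.2)) := by
  induction l with
  | nil => intro p; simp [ckeys]
  | cons d t ih =>
    intro p
    by_cases hd : d = p
    · subst hd; simp [ckeys, ih d]
    · simp [ckeys, Ne.symm hd, hd, ih d]

-- a list whose Finset has as many elements as the list is duplicate-free
lemma nodup_of_card_eq_length (l : List Char) (h : l.toFinset.card = l.length) : l.Nodup := by
  have h1 : l.dedup.length = l.length := by rwa [List.card_toFinset] at h
  have h2 := (List.dedup_sublist l).eq_of_length h1
  rw [← h2]; exact List.nodup_dedup l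

-- KEY: the run keys are duplicate-free iff there are as many distinct letters as runs
lemma nodup_iff_card (l : List Char) :
    (ckeys none l).Nodup ↔ (PySem.Set.ofList l).length = (ckeys none l).length := by
  have hmem : ∀ c, c ∈ ckeys none l ↔ c ∈ PySem.Set.ofList l := fun c =>
    (mem_ckeys c l none (by simp)).trans (PySem.Set.mem_ofList l c).symm
  have hfin : (ckeys none l).toFinset = (PySem.Set.ofList l).toFinset := List.toFinset.ext hmem
  constructor
  · intro hk
    exact (List.perm_of_nodup_nodup_toFinset_eq (PySem.Set.nodup_ofList l) hk hfin.symm).length_eq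
  · intro h
    apply nodup_of_card_eq_length
    rw [hfin, List.toFinset_card_of_nodup (PySem.Set.nodup_ofList l), h]

-- ===== VERDICT (by name: the statement is the Claim_ definition above) =====
theorem sus_spec : Claim_equal_sus := by
  intro n tasks _
  show sus n tasks = sus_alt n tasks
  unfold sus sus_alt
  cases hl : tasks.toList with
  | nil => simp [susLoop]
  | cons d t =>
    rw [susLoop_eq _ _ _ List.nodup_nil]
    simp only [List.nil_append, List.cons_ne_nil, List.tail_cons, ite_false]
    have hruns : 1 + ((d :: t).zip t).countP (fun ab => decide (ab.1 ≠ ab.2))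
        = (ckeys none (d :: t)).length := by
      have hck : ckeys none (d :: t) = d :: ckeys (some d) t := by simp [ckeys]
      rw [hck, List.length_cons, ckeys_length t d, Nat.add_comm]
    have key : ((PySem.Set.ofList (d :: t)).length
        = 1 + ((d :: t).zip t).countP (fun ab => decide (ab.1 ≠ ab.2)))
        ↔ (ckeys none (d :: t)).Nodup := by
      rw [hruns]; exact (nodup_iff_card (d :: t)).symm
    by_cases h : (ckeys none (d :: t)).Nodup
    · rw [if_pos h, if_pos (key.mpr h)]
    · rw [if_neg h, if_neg (fun he => h (key.mp he))]
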